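-- pv_equiv track=rewrite | github.com/GuoshenLi/my_leetcode_python | 477.py | totalHammingDistance
-- ===== SOURCE A (Python) =====
-- from typing import List
--
-- def totalHammingDistance(nums: List[int]) -> int:
--
--     res = 0
--
--     def HammingDistance(num1, num2):
--         tmp = 0
--         for _ in range(32):
--             if num1 & 1 != num2 & 1:
--                 tmp += 1
--             num1 = num1 >> 1
--             num2 = num2 >> 1
--
--         return tmp
--
--     for i in range(len(nums)):
--         for j in range(i + 1, len(nums)):
--             res += HammingDistance(nums[i], nums[j])
--
--     return res
-- ===== SOURCE B (Python) =====
-- from typing import List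
--
-- def totalHammingDistance(nums: List[int]) -> int:
--     n = len(nums)
--     res = 0
--     for b in range(32):
--         ones = 0
--         for x in nums:
--             ones += (x >> b) & 1
--         res += ones * (n - ones)
--     return res
-- ===== Notes on version B (the rewrite author's own statement) =====
-- stated objective: faster
-- what changed: Replaced the O(n^2) pairwise Hamming-distance loop by a per-bit count: for each of the 32 bits, numbers with that bit set contribute ones*(n-ones) differing pairs.
import Mathlib
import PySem

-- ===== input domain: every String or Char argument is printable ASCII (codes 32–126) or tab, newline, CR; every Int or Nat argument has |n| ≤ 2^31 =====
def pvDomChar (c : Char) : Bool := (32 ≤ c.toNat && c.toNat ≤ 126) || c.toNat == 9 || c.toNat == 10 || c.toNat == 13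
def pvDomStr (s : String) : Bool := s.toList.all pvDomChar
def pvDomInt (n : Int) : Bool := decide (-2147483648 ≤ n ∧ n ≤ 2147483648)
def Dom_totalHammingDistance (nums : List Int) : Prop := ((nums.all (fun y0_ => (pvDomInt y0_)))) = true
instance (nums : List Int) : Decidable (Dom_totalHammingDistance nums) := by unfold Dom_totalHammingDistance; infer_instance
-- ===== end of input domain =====

-- B replaces A's O(n^2) pairwise Hamming sum by a per-bit count (ones*(n-ones) per bit), O(n*32).

-- ===== PORT A =====
-- inner helper HammingDistance: 32 iterations, state (tmp, num1, num2);
-- 'num & 1' = PySem.Int.mod num 2, 'num >> 1' = PySem.Int.floordiv num 2 (exact Python semantics)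
def pvHamming (num1 num2 : Int) : Int :=
  ((List.range 32).foldl
    (fun (st : Int × Int × Int) _ =>
      (if PySem.Int.mod st.2.1 2 ≠ PySem.Int.mod st.2.2 2 then st.1 + 1 else st.1,
       PySem.Int.floordiv st.2.1 2, PySem.Int.floordiv st.2.2 2))
    (0, num1, num2)).1

-- the nested index loops 'for i … for j in range(i+1, len)' walk the tails of nums in order
def pvPairLoop : List Int → Int → Int
  | [], res => res
  | x :: rest, res => pvPairLoop rest (rest.foldl (fun r y => r + pvHamming x y) res)

def totalHammingDistance (nums : List Int) : Int := pvPairLoop nums 0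

-- ===== PORT B =====
-- '(x >> b) & 1' = PySem.Int.mod (PySem.Int.floordiv x 2^b) 2 (exact Python semantics)
def totalHammingDistance_alt (nums : List Int) : Int :=
  let n : Int := nums.length
  (List.range 32).foldl
    (fun res b =>
      let ones := nums.foldl
        (fun s x => s + PySem.Int.mod (PySem.Int.floordiv x ((2 : Int) ^ b)) 2) 0
      res + ones * (n - ones)) 0

-- ===== PRECONDITION & SPEC =====
def Spec_totalHammingDistance (nums : List Int) (out : Int) : Prop := out = totalHammingDistance_alt nums
instance (nums : List Int) (out : Int) : Decidable (Spec_totalHammingDistance nums out) := by unfold Spec_totalHammingDistance; infer_instance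

-- ===== CLAIM (what is proved, stated in full; the proofs are below) =====
def Claim_equal_totalHammingDistance : Prop := ∀ (nums : List Int), Dom_totalHammingDistance nums → Spec_totalHammingDistance nums (totalHammingDistance nums)

-- ===== LEMMAS AND PROOFS =====

-- bit b of x, as Python computes it: (x >> b) & 1
def pvBit (b : Nat) (x : Int) : Int := PySem.Int.mod (PySem.Int.floordiv x ((2 : Int) ^ b)) 2

def pvD (b : Nat) (x y : Int) : Int := if pvBit b x ≠ pvBit b y then 1 else 0

lemma pvBit01 (b : Nat) (x : Int) : pvBit b x = 0 ∨ pvBit b x = 1 := by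
  unfold pvBit
  rw [PySem.Int.mod_eq_emod_of_pos (by norm_num)]
  omega

lemma floordiv_pow_succ (x : Int) (m : Nat) :
    PySem.Int.floordiv (PySem.Int.floordiv x ((2:Int)^m)) 2 = PySem.Int.floordiv x ((2:Int)^(m+1)) := by
  rw [PySem.Int.floordiv_eq_ediv_of_pos (by positivity),
      PySem.Int.floordiv_eq_ediv_of_pos (by norm_num),
      PySem.Int.floordiv_eq_ediv_of_pos (by positivity),
      Int.ediv_ediv_of_nonneg (by positivity), pow_succ]

-- the 32-step shift loop computes the per-bit sum
lemma pvHamming_state (x y : Int) (m : Nat) :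
    (List.range m).foldl
      (fun (st : Int × Int × Int) _ =>
        (if PySem.Int.mod st.2.1 2 ≠ PySem.Int.mod st.2.2 2 then st.1 + 1 else st.1,
         PySem.Int.floordiv st.2.1 2, PySem.Int.floordiv st.2.2 2))
      (0, x, y)
    = (((List.range m).map (fun b => pvD b x y)).sum,
       PySem.Int.floordiv x ((2:Int)^m), PySem.Int.floordiv y ((2:Int)^m)) := by
  induction m with
  | zero =>
    simp
  | succ m ih =>
    rw [List.range_succ, List.foldl_append, List.map_append, ih]
    simp only [List.foldl_cons, List.foldl_nil, List.map_cons, List.map_nil, List.sum_append,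
      List.sum_cons, List.sum_nil]
    refine Prod.ext ?_ (Prod.ext ?_ ?_)
    · simp only [pvD, pvBit]
      split_ifs <;> simp
    · exact floordiv_pow_succ x m
    · exact floordiv_pow_succ y m

lemma pvHamming_eq (x y : Int) :
    pvHamming x y = ((List.range 32).map (fun b => pvD b x y)).sum := by
  unfold pvHamming; rw [pvHamming_state]

-- generic fold-of-additions = sum
lemma foldl_add_sum (g : α → Int) (l : List α) (init : Int) :
    l.foldl (fun r a => r + g a) init = init + (l.map g).sum := by
  induction l generalizing init with
  | nil => simp
  | cons a t ih => simp [ih]; ring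

lemma sum_map_add_int' (l : List α) (f g : α → Int) :
    (l.map (fun a => f a + g a)).sum = (l.map f).sum + (l.map g).sum := by
  induction l with
  | nil => simp
  | cons a t ih => simp [ih]; ring

-- swap a double list sum
lemma sum_swap (l : List α) (m : List β) (f : α → β → Int) :
    (l.map (fun a => (m.map (f a)).sum)).sum
      = (m.map (fun b => (l.map (fun a => f a b)).sum)).sum := by
  induction l with
  | nil => simp
  | cons a t ih =>
    simp only [List.map_cons, List.sum_cons, ih]
    rw [← sum_map_add_int']

-- per-bit quantities
def pvOnes (b : Nat) (xs : List Int) : Int := (xs.map (pvBit b)).sum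

def pvPairBit (b : Nat) : List Int → Int
  | [] => 0
  | x :: rest => (rest.map (fun y => pvD b x y)).sum + pvPairBit b rest

lemma sum_d_eq (b : Nat) (x : Int) (rest : List Int) :
    (rest.map (fun y => pvD b x y)).sum
      = if pvBit b x = 1 then (rest.length : Int) - pvOnes b rest else pvOnes b rest := by
  induction rest with
  | nil => simp [pvOnes]
  | cons y t ih =>
    simp only [List.map_cons, List.sum_cons, ih, pvOnes, List.length_cons]
    rcases pvBit01 b x with hx | hx <;> rcases pvBit01 b y with hy | hy <;>
      simp [pvD, hx, hy] <;> omega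

lemma pvPairBit_eq (b : Nat) (xs : List Int) :
    pvPairBit b xs = pvOnes b xs * ((xs.length : Int) - pvOnes b xs) := by
  induction xs with
  | nil => simp [pvPairBit, pvOnes]
  | cons x t ih =>
    simp only [pvPairBit, ih, sum_d_eq, pvOnes, List.map_cons, List.sum_cons, List.length_cons]
    rcases pvBit01 b x with hx | hx <;> simp [hx] <;> ring

-- A's accumulator form
def pvTHD : List Int → Int
  | [] => 0
  | x :: rest => (rest.map (pvHamming x)).sum + pvTHD rest

lemma pvPairLoop_eq (xs : List Int) (res : Int) : pvPairLoop xs res = res + pvTHD xs := by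
  induction xs generalizing res with
  | nil => simp [pvPairLoop, pvTHD]
  | cons x t ih =>
    simp only [pvPairLoop, pvTHD, ih, foldl_add_sum]
    ring

lemma pvTHD_eq (xs : List Int) :
    pvTHD xs = ((List.range 32).map (fun b => pvPairBit b xs)).sum := by
  induction xs with
  | nil => simp [pvTHD, pvPairBit]
  | cons x t ih =>
    simp only [pvTHD, ih, pvPairBit]
    conv_lhs => rw [show (pvHamming x) = fun y => ((List.range 32).map (fun b => pvD b x y)).sum
      from funext fun y => pvHamming_eq x y]
    rw [sum_swap, ← sum_map_add_int']

lemma alt_eq (nums : List Int) :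
    totalHammingDistance_alt nums
      = ((List.range 32).map
          (fun b => pvOnes b nums * ((nums.length : Int) - pvOnes b nums))).sum := by
  unfold totalHammingDistance_alt
  rw [foldl_add_sum (fun b =>
      (nums.foldl (fun s x => s + PySem.Int.mod (PySem.Int.floordiv x ((2 : Int) ^ b)) 2) 0)
        * ((nums.length : Int)
          - nums.foldl (fun s x => s + PySem.Int.mod (PySem.Int.floordiv x ((2 : Int) ^ b)) 2) 0))]
  simp only [zero_add]
  refine congrArg List.sum (List.map_congr_left fun b _ => ?_)
  rw [foldl_add_sum (fun x => PySem.Int.mod (PySem.Int.floordiv x ((2 : Int) ^ b)) 2), zero_add]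
  rfl

-- ===== VERDICT (by name: the statement is the Claim_ definition above) =====
theorem totalHammingDistance_spec : Claim_equal_totalHammingDistance := by
  intro nums _
  show totalHammingDistance nums = totalHammingDistance_alt nums
  rw [totalHammingDistance, pvPairLoop_eq, pvTHD_eq, alt_eq, zero_add]
  exact congrArg List.sum (List.map_congr_left fun b _ => pvPairBit_eq b nums)
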